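-- pv_equiv track=rewrite | github.com/cshaib/diversity | diversity/patterns/part_of_speech.py | pos_patterns
-- ===== SOURCE A (Python) =====
-- from typing import List, Tuple, Any, Set
--
-- def _find_sub_list(
--         sl: List[Any],
--         l: List[Any]
-- ) -> List[Any]:
--     """ Given a pattern and a list of strings, returns sublists matching the pattern. """
--
--     results = []
--     sll = len(sl)
--     for ind in (i for i,e in enumerate(l) if e==sl[0]):
--         if l[ind:ind+sll]==sl:
--             results.append((ind, ind+sll-1))
--
--     return results
--
-- def pos_patterns(
--         text: List[List[Tuple[str, str]]],
--         pattern: str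
-- ) -> Set[str]:
--     """ Finds all substrings matching a part of speech pattern.
--
--     Args:
--         text (List[List[Tuple[str, str]]]): Text containing words and part-of-speech tags.
--         pattern (str): Part-of-speech tag pattern to search for.
--
--     Returns:
--         Set[str]: Returns all the string matching the pattern.
--     """
--
--     pos = []
--     word = []
--
--     # text is a list of lists of tuples (word, part of speech)
--     for doc in text:
--         pos.append([i[1] for i in doc])
--         word.append([i[0] for i in doc])
--
--     pos = [' '.join(x) for x in pos]
--     word = [' '.join(x) for x in word]
--
--     all_matches = []
--
--     # return positions of each tag and the corresponding tokens
--     for w, p in zip(word, pos):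
--
--         test = _find_sub_list(pattern.split(), p.split())
--
--         if test:
--             for occ in test:
--                 splits = w.split()[int(occ[0]):int(occ[1]+1)]
--                 all_matches.append(" ".join(splits))
--
--     return set(all_matches)
-- ===== SOURCE B (Python) =====
-- from typing import List, Tuple, Set
--
--
-- def pos_patterns(
--         text: List[List[Tuple[str, str]]],
--         pattern: str
-- ) -> Set[str]:
--     """Rabin-Karp rolling-hash search for the POS-tag pattern in each document
--     (single pass per document instead of a slice comparison at every candidate
--     position; a hash hit is verified by a direct comparison, so the result is
--     exact)."""
--     P = 1000000007
--     BASE = 1000003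
--
--     def thash(s: str) -> int:
--         h = 0
--         for c in s:
--             h = (h * 131 + ord(c)) % P
--         return h
--
--     pat = pattern.split()
--     m = len(pat)
--     if m == 0:
--         return set()
--     hp = 0
--     for t in pat:
--         hp = (hp * BASE + thash(t)) % P
--     pw = pow(BASE, m - 1, P)
--
--     out = []
--     for doc in text:
--         words = " ".join(w for w, _ in doc).split()
--         tags = " ".join(t for _, t in doc).split()
--         n = len(tags)
--         if n < m:
--             continue
--         th = [thash(t) for t in tags]
--         h = 0
--         for j in range(m):
--             h = (h * BASE + th[j]) % P
--         for i in range(n - m + 1):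
--             if h == hp and tags[i:i + m] == pat:
--                 out.append(" ".join(words[i:i + m]))
--             if i + m < n:
--                 h = ((h - th[i] * pw) * BASE + th[i + m]) % P
--     return set(out)
-- ===== Notes on version B (the rewrite author's own statement) =====
-- stated objective: alternative
-- what changed: Replaces the naive first-token-filter-plus-slice-comparison substring search of A with a Rabin-Karp rolling-hash scan (one modular hash update per position, hash hits verified by one exact comparison), guards the empty pattern instead of raising, and drops A's intermediate pos/word string-list phase by processing each document in one pass.
import Mathlib
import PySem

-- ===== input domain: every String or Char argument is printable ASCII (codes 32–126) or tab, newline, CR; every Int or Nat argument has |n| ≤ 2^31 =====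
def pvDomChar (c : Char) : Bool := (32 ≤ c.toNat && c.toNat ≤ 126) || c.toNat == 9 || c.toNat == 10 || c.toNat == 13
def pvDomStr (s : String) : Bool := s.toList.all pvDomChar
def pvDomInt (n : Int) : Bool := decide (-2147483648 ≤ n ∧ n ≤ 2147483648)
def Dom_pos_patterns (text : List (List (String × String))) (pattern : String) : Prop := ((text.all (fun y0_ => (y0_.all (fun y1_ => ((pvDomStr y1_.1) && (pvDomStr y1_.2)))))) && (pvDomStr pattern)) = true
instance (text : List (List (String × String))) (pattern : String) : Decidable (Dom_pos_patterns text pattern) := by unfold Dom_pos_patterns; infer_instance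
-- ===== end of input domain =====

-- B replaces A's per-position slice comparison by a Rabin–Karp rolling-hash scan of each
-- document's tag sequence (hash hits verified exactly); equivalence of return values is proved
-- on Pre_ (A raises IndexError on an empty/whitespace pattern with a non-empty tag sequence).

-- ===== PORT A =====
-- _find_sub_list: the generator evaluates sl[0]; with sl = [] and l ≠ [] Python raises
-- IndexError (excluded by Pre_); pyGet? sl 0 = none is rendered as "no match" here.
def pvFindSubList (sl l : List String) : List (Int × Int) :=
  let sll : Int := (sl.length : Int)
  ((PySem.List.enumerate l).filter
      (fun p => (PySem.List.pyGet? sl 0).any (fun h => p.2 == h))).foldl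
    (fun res p =>
      if PySem.List.slice l (some p.1) (some (p.1 + sll)) == sl then
        res ++ [(p.1, p.1 + sll - 1)]
      else res) []

def pos_patterns (text : List (List (String × String))) (pattern : String) : List String :=
  -- one loop appending to pos and word simultaneously
  let pw := text.foldl
    (fun (st : List (List String) × List (List String)) doc =>
      (st.1 ++ [doc.map (fun i => i.2)], st.2 ++ [doc.map (fun i => i.1)]))
    ([], [])
  let pos := pw.1.map (fun x => PySem.Str.join " " x)
  let word := pw.2.map (fun x => PySem.Str.join " " x)
  let allMatches := (word.zip pos).foldl
    (fun acc wp =>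
      let test := pvFindSubList (PySem.Str.split₀ pattern) (PySem.Str.split₀ wp.2)
      if test ≠ [] then
        test.foldl (fun acc2 occ =>
          acc2 ++ [PySem.Str.join " "
            (PySem.List.slice (PySem.Str.split₀ wp.1) (some occ.1) (some (occ.2 + 1)))]) acc
      else acc) []
  PySem.Set.ofList allMatches

-- ===== PORT B =====
def pvThash (s : String) : Int :=
  s.toList.foldl (fun h c => PySem.Int.mod (h * 131 + (c.toNat : Int)) 1000000007) 0

-- the `for i in range(n - m + 1)` loop of Source B, carrying (h, out); indices into th are in range
def pvRkLoop (tags words pat : List String) (th : List Int) (hp pw : Int) (m n : Nat) :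
    List Nat → Int → List String → List String
  | [], _, acc => acc
  | i :: rest, h, acc =>
    let acc' :=
      if h == hp && (PySem.List.slice tags (some (i : Int)) (some ((i : Int) + (m : Int))) == pat)
      then acc ++ [PySem.Str.join " "
        (PySem.List.slice words (some (i : Int)) (some ((i : Int) + (m : Int))))]
      else acc
    let h' :=
      if i + m < n then
        PySem.Int.mod ((h - th.getD i 0 * pw) * 1000003 + th.getD (i + m) 0) 1000000007
      else h
    pvRkLoop tags words pat th hp pw m n rest h' acc'

def pos_patterns_alt (text : List (List (String × String))) (pattern : String) : List String :=
  let pat := PySem.Str.split₀ pattern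
  let m := pat.length
  if m = 0 then PySem.Set.ofList []
  else
    let hp := pat.foldl (fun a t => PySem.Int.mod (a * 1000003 + pvThash t) 1000000007) 0
    let pw := PySem.Int.powMod 1000003 (m - 1) 1000000007
    let out := text.foldl
      (fun out doc =>
        let words := PySem.Str.split₀ (PySem.Str.join " " (doc.map (fun p => p.1)))
        let tags := PySem.Str.split₀ (PySem.Str.join " " (doc.map (fun p => p.2)))
        let n := tags.length
        if n < m then out
        else
          let th := tags.map pvThash
          let h0 := (List.range m).foldl
            (fun a j => PySem.Int.mod (a * 1000003 + th.getD j 0) 1000000007) 0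
          pvRkLoop tags words pat th hp pw m n (List.range (n - m + 1)) h0 out)
      []
    PySem.Set.ofList out

-- ===== PRECONDITION & SPEC =====
-- Pre_ excludes exactly the inputs on which A raises IndexError: a pattern that splits to []
-- while some document's joined tag string splits to a non-empty token list (sl[0] on sl = []).
def Pre_pos_patterns (text : List (List (String × String))) (pattern : String) : Prop :=
  PySem.Str.split₀ pattern ≠ [] ∨
    ∀ doc ∈ text, PySem.Str.split₀ (PySem.Str.join " " (doc.map (fun p => p.2))) = []
instance (text : List (List (String × String))) (pattern : String) :
    Decidable (Pre_pos_patterns text pattern) := by unfold Pre_pos_patterns; infer_instance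

def pvWitness_pos_patterns : (List (List (String × String))) × String :=
  ([[("the", "DT"), ("quick", "JJ"), ("fox", "NN")], [("a", "DT"), ("dog", "NN")]], "DT JJ")

def Spec_pos_patterns (text : List (List (String × String))) (pattern : String)
    (out : List String) : Prop := out = pos_patterns_alt text pattern
instance (text : List (List (String × String))) (pattern : String) (out : List String) :
    Decidable (Spec_pos_patterns text pattern out) := by unfold Spec_pos_patterns; infer_instance

-- ===== CLAIM (what is proved, stated in full; the proofs are below) =====
def Claim_equal_pos_patterns : Prop := ∀ (text : List (List (String × String))) (pattern : String), Dom_pos_patterns text pattern → Pre_pos_patterns text pattern → Spec_pos_patterns text pattern (pos_patterns text pattern)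


-- ===== LEMMAS AND PROOFS =====

-- proof-side abbreviations
def pvFM (l : List Int) (a : Int) : Int :=
  l.foldl (fun a x => (a * 1000003 + x) % 1000000007) a
def pvPoly (l : List Int) (a : Int) : Int := l.foldl (fun a x => a * 1000003 + x) a
def pvHseq (l : List Int) : Int := pvFM l 0
def pvWin (th : List Int) (m i : Nat) : Int := pvHseq ((th.drop i).take m)
def pvMatches (ts ws pat : List String) : List String :=
  ((List.range (ts.length + 1 - pat.length)).filter
      (fun i => decide ((ts.drop i).take pat.length = pat))).map
    (fun i => PySem.Str.join " " ((ws.drop i).take pat.length))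

theorem pvmod (a : Int) : PySem.Int.mod a 1000000007 = a % 1000000007 :=
  PySem.Int.mod_eq_emod_of_pos (by norm_num)

theorem pvPoly_shift (l : List Int) : ∀ a : Int,
    pvPoly l a = a * 1000003 ^ l.length + pvPoly l 0 := by
  induction l with
  | nil => intro a; simp [pvPoly]
  | cons x t ih =>
    intro a
    simp only [pvPoly, List.foldl_cons, List.length_cons, zero_mul, zero_add]
    rw [show t.foldl (fun a x => a * 1000003 + x) (a * 1000003 + x) = pvPoly t (a * 1000003 + x) from rfl,
        show t.foldl (fun a x => a * 1000003 + x) x = pvPoly t x from rfl,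
        ih (a * 1000003 + x), ih x]
    ring

theorem pvPoly_append (l : List Int) (y : Int) :
    pvPoly (l ++ [y]) 0 = pvPoly l 0 * 1000003 + y := by
  simp [pvPoly, List.foldl_append]

theorem pvFM_congr (l : List Int) : ∀ a b : Int,
    a % 1000000007 = b % 1000000007 → pvFM l a % 1000000007 = pvPoly l b % 1000000007 := by
  induction l with
  | nil => intro a b h; exact h
  | cons x t ih =>
    intro a b h
    simp only [pvFM, pvPoly, List.foldl_cons]
    apply ih
    rw [Int.emod_emod_of_dvd _ dvd_rfl]
    exact ((Int.ModEq.mul_right 1000003 h).add_right x)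

theorem pvFM_range (l : List Int) : ∀ a : Int, 0 ≤ a → a < 1000000007 →
    0 ≤ pvFM l a ∧ pvFM l a < 1000000007 := by
  induction l with
  | nil => intro a h1 h2; exact ⟨h1, h2⟩
  | cons x t ih =>
    intro a h1 h2
    simp only [pvFM, List.foldl_cons]
    exact ih _ (Int.emod_nonneg _ (by norm_num)) (Int.emod_lt_of_pos _ (by norm_num))

theorem pvHseq_eq (l : List Int) : pvHseq l = pvPoly l 0 % 1000000007 := by
  obtain ⟨h1, h2⟩ := pvFM_range l 0 le_rfl (by norm_num)
  have h3 := pvFM_congr l 0 0 rfl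
  rw [Int.emod_eq_of_lt h1 h2] at h3
  exact h3

theorem pvRoll (x y : Int) (t : List Int) :
    ((pvHseq (x :: t) - x * (1000003 ^ t.length % 1000000007)) * 1000003 + y) % 1000000007
      = pvHseq (t ++ [y]) := by
  rw [pvHseq_eq, pvHseq_eq, pvPoly_append]
  have hQ : pvPoly (x :: t) 0 = x * 1000003 ^ t.length + pvPoly t 0 := by
    simp only [pvPoly, List.foldl_cons, zero_mul, zero_add]
    exact pvPoly_shift t x
  have h1 : pvPoly (x :: t) 0 % 1000000007 ≡ pvPoly (x :: t) 0 [ZMOD (1000000007:Int)] :=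
    Int.emod_emod_of_dvd _ dvd_rfl
  have h2 : x * (1000003 ^ t.length % 1000000007) ≡ x * 1000003 ^ t.length [ZMOD (1000000007:Int)] :=
    Int.ModEq.mul_left x (Int.emod_emod_of_dvd _ dvd_rfl)
  have h3 := (((h1.sub h2).mul_right 1000003).add_right y)
  have h4 : pvPoly (x :: t) 0 - x * 1000003 ^ t.length = pvPoly t 0 := by rw [hQ]; ring
  calc ((pvPoly (x :: t) 0 % 1000000007 - x * (1000003 ^ t.length % 1000000007)) * 1000003 + y) % 1000000007
      = ((pvPoly (x :: t) 0 - x * 1000003 ^ t.length) * 1000003 + y) % 1000000007 := h3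
    _ = (pvPoly t 0 * 1000003 + y) % 1000000007 := by rw [h4]


theorem pvFilterTrim (c : Nat → Bool) (k : Nat) : ∀ (n : Nat), k ≤ n →
    (∀ i, k ≤ i → i < n → c i = false) →
    (List.range n).filter c = (List.range k).filter c := by
  intro n
  induction n with
  | zero => intro hk _; interval_cases k; rfl
  | succ n ih =>
    intro hk hf
    rcases Nat.lt_or_ge k (n + 1) with hlt | hge
    · have hk' : k ≤ n := by omega
      rw [List.range_succ, List.filter_append, ih hk' (fun i h1 h2 => hf i h1 (by omega)),
          show (List.filter c [n]) = [] from by simp [hf n hk' (by omega)], List.append_nil]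
    · have : k = n + 1 := by omega
      subst this; rfl

theorem pvFoldRange (g : Int → Int → Int) (l : List Int) (z : Int) :
    ∀ m : Nat, m ≤ l.length →
    (List.range m).foldl (fun a j => g a (l.getD j 0)) z = (l.take m).foldl g z := by
  intro m
  induction m with
  | zero => intro _; rfl
  | succ m ih =>
    intro h
    have hm : m < l.length := by omega
    rw [List.range_succ, List.foldl_append, ih (by omega)]
    rw [show List.foldl (fun a j => g a (l.getD j 0)) (List.foldl g z (List.take m l)) [m]
          = g (List.foldl g z (List.take m l)) (l.getD m 0) from rfl,
        List.getD_eq_getElem l 0 hm, List.take_add_one, List.getElem?_eq_getElem hm]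
    simp only [Option.toList_some, List.foldl_append, List.foldl_cons, List.foldl_nil]

theorem pvFoldlFixed {α β : Type} (l : List α) (init : β) :
    l.foldl (fun a _ => a) init = init := by
  induction l generalizing init with
  | nil => rfl
  | cons x t ih => exact ih init


theorem pvWin_eq_hp (ts pat : List String) (i : Nat)
    (hW : (ts.drop i).take pat.length = pat) :
    pvWin (ts.map pvThash) pat.length i = pvHseq (pat.map pvThash) := by
  unfold pvWin
  rw [← List.map_drop, ← List.map_take, hW]

theorem pvRkLoop_spec (ts ws : List String) (pat : List String) (hpat : pat ≠ []) :
    ∀ (k : Nat), ∀ (i : Nat) (h : Int) (acc : List String),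
      i + k + pat.length = ts.length + 1 →
      h = pvWin (ts.map pvThash) pat.length i →
      pvRkLoop ts ws pat (ts.map pvThash) (pvHseq (pat.map pvThash))
          (1000003 ^ (pat.length - 1) % 1000000007) pat.length ts.length
          (List.range' i k) h acc
        = acc ++ ((List.range' i k).filter
              (fun j => decide ((ts.drop j).take pat.length = pat))).map
            (fun j => PySem.Str.join " " ((ws.drop j).take pat.length)) := by
  have hm1 : 1 ≤ pat.length := List.length_pos_iff.mpr hpat
  intro k
  induction k with
  | zero => intro i h acc _ _; simp [pvRkLoop]
  | succ k ih =>
    intro i h acc hik hw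
    have hi : i < ts.length := by omega
    rw [List.range'_succ]
    show pvRkLoop _ _ _ _ _ _ _ _ (i :: List.range' (i + 1) k) h acc = _
    rw [pvRkLoop]
    rw [PySem.List.slice_natCast_add ts i pat.length]
    have hcond : (h == pvHseq (pat.map pvThash) && ((ts.drop i).take pat.length == pat))
        = decide ((ts.drop i).take pat.length = pat) := by
      by_cases hW : (ts.drop i).take pat.length = pat
      · simp [hW, hw, pvWin_eq_hp ts pat i hW]
      · simp [hW]
    rw [hcond]
    rcases Nat.eq_zero_or_pos k with hk0 | hkpos
    · subst hk0
      simp only [List.range'_zero, pvRkLoop, List.filter_cons, List.filter_nil]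
      by_cases hci : decide ((ts.drop i).take pat.length = pat) = true <;>
        simp [hci, PySem.List.slice_natCast_add ws i pat.length]
    · -- k > 0 : the window rolls to position i + 1
      have hlt : i + pat.length < ts.length := by omega
      obtain ⟨mm, hm⟩ : ∃ mm, pat.length = mm + 1 := ⟨pat.length - 1, by omega⟩
      have hthlen : (ts.map pvThash).length = ts.length := by simp
      set th : List Int := ts.map pvThash with hth
      have hi' : i < th.length := by omega
      have himm : i + pat.length < th.length := by omega
      have d1 : (th.drop i).take pat.length = th.getD i 0 :: ((th.drop (i + 1)).take mm) := by
        rw [List.drop_eq_getElem_cons hi', hm, List.take_succ_cons,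
            List.getD_eq_getElem th 0 hi']
      have d2 : (th.drop (i + 1)).take pat.length
          = ((th.drop (i + 1)).take mm) ++ [th.getD (i + pat.length) 0] := by
        rw [hm, List.take_add_one, List.getElem?_drop,
            show i + 1 + mm = i + (mm + 1) from by omega,
            List.getElem?_eq_getElem (show i + (mm + 1) < th.length from by omega),
            List.getD_eq_getElem th 0 (show i + (mm + 1) < th.length from by omega)]
        simp
      have tlen : ((th.drop (i + 1)).take mm).length = mm := by
        rw [List.length_take, List.length_drop]; omega
      have hroll :
          PySem.Int.mod ((h - th.getD i 0 * (1000003 ^ (pat.length - 1) % 1000000007)) * 1000003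
              + th.getD (i + pat.length) 0) 1000000007
            = pvWin th pat.length (i + 1) := by
        rw [pvmod, hw]
        have hr := pvRoll (th.getD i 0) (th.getD (i + pat.length) 0) ((th.drop (i + 1)).take mm)
        rw [tlen] at hr
        unfold pvWin
        rw [d1, show pat.length - 1 = mm from by omega, hr, ← d2]
      rw [if_pos hlt, hroll]
      rw [ih (i + 1) _ _ (by omega) rfl]
      rw [List.filter_cons]
      by_cases hci : decide ((ts.drop i).take pat.length = pat) = true <;>
        simp [hci, PySem.List.slice_natCast_add ws i pat.length]

theorem pvFind_eq (pat ts : List String) (hpat : pat ≠ []) :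
    pvFindSubList pat ts
      = ((List.range ts.length).filter
            (fun k => decide ((ts.drop k).take pat.length = pat))).map
          (fun k : Nat => ((k : Int), (k : Int) + (pat.length : Int) - 1)) := by
  obtain ⟨p0, pr, rfl⟩ := List.exists_cons_of_ne_nil hpat
  simp only [pvFindSubList]
  rw [PySem.List.foldl_append_if, List.filter_filter,
      PySem.List.enumerate_eq_map_pyRange ts "",
      show PySem.List.len ts = ((ts.length : Nat) : Int) from by simp [PySem.List.len],
      PySem.List.pyRange_zero_natCast ts.length]
  simp only [List.map_map, List.filter_map, List.nil_append, Function.comp_def]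
  have key : ∀ (C D : Nat → Bool) (F G : Nat → Int × Int),
      (∀ k ∈ List.range ts.length, C k = D k) → (∀ k, F k = G k) →
      List.map F (List.filter C (List.range ts.length))
        = List.map G (List.filter D (List.range ts.length)) := by
    intro C D F G h1 h2
    rw [List.filter_congr h1]
    exact List.map_congr_left (fun a _ => h2 a)
  apply key
  · intro k hk
    have hk' : k < ts.length := List.mem_range.mp hk
    have hcast : ((p0 :: pr).length : Int) = ((k : Int) + ((p0 :: pr).length : Int)) - (k : Int) := by ring
    rw [PySem.List.slice_natCast_add ts k (p0 :: pr).length]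
    by_cases hW : (ts.drop k).take (pr.length + 1) = p0 :: pr
    · have hd : ts.drop k = ts[k] :: ts.drop (k + 1) := List.drop_eq_getElem_cons hk'
      have hhead : ts[k] = p0 := by
        rw [hd, List.take_succ_cons] at hW
        exact (List.cons_eq_cons.mp hW).1
      simp [hW, PySem.List.pyGetD_natCast,
            List.getElem?_eq_getElem hk', hhead]
    · simp [hW, beq_iff_eq]
  · intro k; rfl

theorem pvAdoc (pat ts ws : List String) (hpat : pat ≠ []) (acc : List String) :
    (if pvFindSubList pat ts ≠ [] then
       (pvFindSubList pat ts).foldl (fun acc2 occ =>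
         acc2 ++ [PySem.Str.join " "
           (PySem.List.slice ws (some occ.1) (some (occ.2 + 1)))]) acc
     else acc)
    = acc ++ pvMatches ts ws pat := by
  have hm1 : 1 ≤ pat.length := List.length_pos_iff.mpr hpat
  have hfail : ∀ i, ts.length + 1 - pat.length ≤ i → i < ts.length →
      (fun k => decide ((ts.drop k).take pat.length = pat)) i = false := by
    intro i h1 h2
    simp only [decide_eq_false_iff_not]
    intro heq
    have := congrArg List.length heq
    rw [List.length_take, List.length_drop] at this
    omega
  have htrim := pvFilterTrim (fun k => decide ((ts.drop k).take pat.length = pat))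
      (ts.length + 1 - pat.length) ts.length (by omega) hfail
  by_cases ht : pvFindSubList pat ts = []
  · rw [if_neg (by simp [ht])]
    have hnil : pvMatches ts ws pat = [] := by
      unfold pvMatches
      rw [← htrim]
      rw [pvFind_eq pat ts hpat] at ht
      rcases List.map_eq_nil_iff.mp ht with hft
      rw [hft]; rfl
    rw [hnil, List.append_nil]
  · rw [if_pos ht, PySem.List.foldl_append_singleton_eq_map, pvFind_eq pat ts hpat,
        List.map_map]
    unfold pvMatches
    rw [← htrim]
    congr 1
    apply List.map_congr_left
    intro k _
    simp only [Function.comp]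
    rw [show (k : Int) + (pat.length : Int) - 1 + 1 = (k : Int) + (pat.length : Int) from by ring,
        PySem.List.slice_natCast_add ws k pat.length]

theorem pvBdoc (pat ts ws : List String) (hpat : pat ≠ []) (out : List String) :
    (if ts.length < pat.length then out
     else
       pvRkLoop ts ws pat (ts.map pvThash)
         (pat.foldl (fun a t => PySem.Int.mod (a * 1000003 + pvThash t) 1000000007) 0)
         (PySem.Int.powMod 1000003 (pat.length - 1) 1000000007) pat.length ts.length
         (List.range (ts.length - pat.length + 1))
         ((List.range pat.length).foldl
            (fun a j => PySem.Int.mod (a * 1000003 + (ts.map pvThash).getD j 0) 1000000007) 0)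
         out)
    = out ++ pvMatches ts ws pat := by
  have hm1 : 1 ≤ pat.length := List.length_pos_iff.mpr hpat
  by_cases hnm : ts.length < pat.length
  · rw [if_pos hnm]
    have hnil : pvMatches ts ws pat = [] := by
      unfold pvMatches
      rw [show ts.length + 1 - pat.length = 0 from by omega]
      rfl
    rw [hnil, List.append_nil]
  · rw [if_neg hnm]
    have hhp : pat.foldl (fun a t => PySem.Int.mod (a * 1000003 + pvThash t) 1000000007) 0
        = pvHseq (pat.map pvThash) := by
      simp only [pvmod, pvHseq, pvFM, List.foldl_map]
    have hpw : PySem.Int.powMod 1000003 (pat.length - 1) 1000000007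
        = 1000003 ^ (pat.length - 1) % 1000000007 := by
      rw [PySem.Int.powMod_eq, pvmod]
    have hh0 : (List.range pat.length).foldl
          (fun a j => PySem.Int.mod (a * 1000003 + (ts.map pvThash).getD j 0) 1000000007) 0
        = pvWin (ts.map pvThash) pat.length 0 := by
      simp only [pvmod]
      rw [pvFoldRange (fun a x => (a * 1000003 + x) % 1000000007) (ts.map pvThash) 0
            pat.length (by simp; omega)]
      unfold pvWin pvHseq pvFM
      rw [List.drop_zero]
    rw [hhp, hpw, hh0, List.range_eq_range',
        pvRkLoop_spec ts ws pat hpat (ts.length - pat.length + 1) 0 _ out (by omega) rfl]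
    unfold pvMatches
    rw [show ts.length + 1 - pat.length = ts.length - pat.length + 1 from by omega,
        List.range_eq_range']

-- ===== VERDICT (by name: the statement is the Claim_ definition above) =====
theorem pos_patterns_spec : Claim_equal_pos_patterns := by
  unfold Claim_equal_pos_patterns
  intro text pattern _ hpre
  unfold Spec_pos_patterns pos_patterns pos_patterns_alt
  dsimp only
  rw [PySem.List.foldl_prod_mk
        (fun (a : List (List String)) (doc : List (String × String)) => a ++ [doc.map (fun i => i.2)])
        (fun (a : List (List String)) (doc : List (String × String)) => a ++ [doc.map (fun i => i.1)])
        text [] []]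
  dsimp only
  rw [PySem.List.foldl_append_singleton_eq_map, PySem.List.foldl_append_singleton_eq_map]
  simp only [List.nil_append, List.map_map, List.zip_map', List.foldl_map, Function.comp_def]
  by_cases hpat : PySem.Str.split₀ pattern = []
  · -- empty pattern: Pre_ guarantees every document's tag string splits to []
    have hall : ∀ doc ∈ text,
        PySem.Str.split₀ (PySem.Str.join " " (doc.map (fun p => p.2))) = [] := by
      rcases hpre with h | h
      · exact absurd hpat h
      · exact h
    rw [if_pos (by simp [hpat])]
    have hstep : ∀ (acc : List String), ∀ doc ∈ text,
        (fun (acc : List String) (doc : List (String × String)) =>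
          if pvFindSubList (PySem.Str.split₀ pattern)
              (PySem.Str.split₀ (PySem.Str.join " " (doc.map (fun i => i.2)))) ≠ [] then
            (pvFindSubList (PySem.Str.split₀ pattern)
              (PySem.Str.split₀ (PySem.Str.join " " (doc.map (fun i => i.2))))).foldl
              (fun acc2 occ =>
                acc2 ++ [PySem.Str.join " " (PySem.List.slice
                  (PySem.Str.split₀ (PySem.Str.join " " (doc.map (fun i => i.1))))
                  (some occ.1) (some (occ.2 + 1)))]) acc
          else acc) acc doc = (fun acc _ => acc) acc doc := by
      intro acc doc hdoc
      dsimp only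
      rw [show (doc.map (fun i : String × String => i.2)) = (doc.map (fun p : String × String => p.2)) from rfl,
          hall doc hdoc]
      rw [show pvFindSubList (PySem.Str.split₀ pattern) [] = [] from rfl]
      simp
    rw [PySem.List.foldl_congr_mem text _ (fun (acc : List String) _ => acc) []
          (fun acc x hx => hstep acc x hx),
        pvFoldlFixed]
  · have hpat' : PySem.Str.split₀ pattern ≠ [] := hpat
    rw [if_neg (by simp [hpat])]
    rw [PySem.List.foldl_congr_mem text _
          (fun (acc : List String) (doc : List (String × String)) =>
            acc ++ pvMatches (PySem.Str.split₀ (PySem.Str.join " " (doc.map (fun i => i.2))))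
              (PySem.Str.split₀ (PySem.Str.join " " (doc.map (fun i => i.1))))
              (PySem.Str.split₀ pattern)) []
          (fun acc doc _ =>
            pvAdoc (PySem.Str.split₀ pattern)
              (PySem.Str.split₀ (PySem.Str.join " " (doc.map (fun i => i.2))))
              (PySem.Str.split₀ (PySem.Str.join " " (doc.map (fun i => i.1)))) hpat' acc)]
    rw [PySem.List.foldl_congr_mem text _
          (fun (acc : List String) (doc : List (String × String)) =>
            acc ++ pvMatches (PySem.Str.split₀ (PySem.Str.join " " (doc.map (fun i => i.2))))
              (PySem.Str.split₀ (PySem.Str.join " " (doc.map (fun i => i.1))))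
              (PySem.Str.split₀ pattern)) []
          (fun acc doc _ =>
            pvBdoc (PySem.Str.split₀ pattern)
              (PySem.Str.split₀ (PySem.Str.join " " (doc.map (fun i => i.2))))
              (PySem.Str.split₀ (PySem.Str.join " " (doc.map (fun i => i.1)))) hpat' acc)]
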